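/- GENERATED by c/gen_decode.py: decode facts of the image, one per distinct instruction byte string. -/
import UserX.DecodeImage

#decode_all Vorbis.Dec
  "0f28d4"  -- movaps xmm2,xmm4
  "0f845fffffff"  -- je 11148d
  "0f84fe000000"  -- je 1083e4
  "0f88b0000000"  -- js 10f4b9
  "0f8f7affffff"  -- jg 1163eb
  "0fb6d0"  -- movzx edx,al
  "39c3"  -- cmp ebx,eax
  "410fb6441f41"  -- movzx eax,BYTE PTR [r15+rbx*1+0x41]
  "415c"  -- pop r12
  "41891c24"  -- mov DWORD PTR [r12],ebx
  "418b6e04"  -- mov ebp,DWORD PTR [r14+0x4]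
  "41c7850c00c0000000f3f3"  -- mov DWORD PTR [r13+0xc0000c],0xf3f30000
  "4401fd"  -- add ebp,r15d
  "4439ea"  -- cmp edx,r13d
  "44897308"  -- mov DWORD PTR [rbx+0x8],r14d
  "4489fa"  -- mov edx,r15d
  "448bad40080000"  -- mov r13d,DWORD PTR [rbp+0x840]
  "4539ef"  -- cmp r15d,r13d
  "458b3f"  -- mov r15d,DWORD PTR [r15]
  "48035008"  -- add rdx,QWORD PTR [rax+0x8]
  "48639538ffffff"  -- movsxd rdx,DWORD PTR [rbp-0xc8]
  "4883bba800000000"  -- cmp QWORD PTR [rbx+0xa8],0x0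
  "4889442428"  -- mov QWORD PTR [rsp+0x28],rax
  "4889eb"  -- mov rbx,rbp
  "488b7528"  -- mov rsi,QWORD PTR [rbp+0x28]
  "488d2cc500000000"  -- lea rbp,[rax*8+0x0]
  "488d7b58"  -- lea rdi,[rbx+0x58]
  "488d98ae000000"  -- lea rbx,[rax+0xae]
  "488dbc2bd4050000"  -- lea rdi,[rbx+rbp*1+0x5d4]
  "48c1e203"  -- shl rdx,0x3
  "4901ce"  -- add r14,rcx
  "4981c4a0000000"  -- add r12,0xa0
  "498b5cde08"  -- mov rbx,QWORD PTR [r14+rbx*8+0x8]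
  "498d7e0d"  -- lea rdi,[r14+0xd]
  "49c1e602"  -- shl r14,0x2
  "4a8dbceb98050000"  -- lea rdi,[rbx+r13*8+0x598]
  "4c63b560ffffff"  -- movsxd r14,DWORD PTR [rbp-0xa0]
  "4c89ef"  -- mov rdi,r13
  "4c8d2441"  -- lea r12,[rcx+rax*2]
  "4d0fbfed"  -- movsx r13,r13w
  "4d8d7c0500"  -- lea r15,[r13+rax*1+0x0]
  "660f2fc8"  -- comisd xmm1,xmm0
  "66410f7ed7"  -- movd r15d,xmm2
  "6a00"  -- push 0x0
  "743a"  -- je 113ec8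
  "752c"  -- jne 113b15
  "78ea"  -- js 103eab
  "7e49"  -- jle 109945
  "80bbd506000000"  -- cmp BYTE PTR [rbx+0x6d5],0x0
  "83c014"  -- add eax,0x14
  "89442408"  -- mov DWORD PTR [rsp+0x8],eax
  "898540ffffff"  -- mov DWORD PTR [rbp-0xc0],eax
  "8b1c24"  -- mov ebx,DWORD PTR [rsp]
  "8b6d00"  -- mov ebp,DWORD PTR [rbp+0x0]
  "8d1409"  -- lea edx,[rcx+rcx*1]
  "bbb71dc104"  -- mov ebx,0x4c11db7
  "c1ff1e"  -- sar edi,0x1e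
  "c7831400c0000000f2f2"  -- mov DWORD PTR [rbx+0xc00014],0xf2f20000
  "e8021effff"  -- call 100640
  "e80c90ffff"  -- call 100800
  "e816f1ffff"  -- call 110a60
  "e81f73ffff"  -- call 100640
  "e82a0cffff"  -- call 100480
  "e832adfeff"  -- call 1008e0
  "e83ceffeff"  -- call 100800
  "e847ffffff"  -- call 10d1c0
  "e852b0ffff"  -- call 1075c0
  "e85ef3feff"  -- call 100640
  "e86b76ffff"  -- call 10d1c0
  "e876d5ffff"  -- call 10ec00
  "e881b5feff"  -- call 100720
  "e88cfdffff"  -- call 10c080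
  "e89665ffff"  -- call 10b100
  "e8a09effff"  -- call 100640
  "e8ab7affff"  -- call 100640
  "e8b46bfeff"  -- call 100720
  "e8be96ffff"  -- call 109120
  "e8c8f2feff"  -- call 100480
  "e8d2fbffff"  -- call 107500
  "e8dd9efeff"  -- call 100640
  "e8e6f8ffff"  -- call 101200
  "e8eeaefeff"  -- call 100300
  "e8f9eafeff"  -- call 103d00
  "e91ddaffff"  -- jmp 113b22
  "e964030000"  -- jmp 10536e
  "e9b7070000"  -- jmp 10fa53
  "eb09"  -- jmp 1024fb
  "eb9f"  -- jmp 10b3de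
  "ebfd"  -- jmp 100056
  "f20f59059ddc0100"  -- mulsd xmm0,QWORD PTR [rip+0x1dc9d]
  "f20f5e1df4e10100"  -- divsd xmm3,QWORD PTR [rip+0x1e1f4]
  "f30f105c2408"  -- movss xmm3,DWORD PTR [rsp+0x8]
  "f30f107dbc"  -- movss xmm7,DWORD PTR [rbp-0x44]
  "f30f115bfc"  -- movss DWORD PTR [rbx-0x4],xmm3
  "f30f2ac5"  -- cvtsi2ss xmm0,ebp
  "f30f593b"  -- mulss xmm7,DWORD PTR [rbx]
  "f30f5c7bf4"  -- subss xmm7,DWORD PTR [rbx-0xc]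
  "f3410f106d04"  -- movss xmm5,DWORD PTR [r13+0x4]
  "f7db"  -- neg ebx
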